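-- pv_equiv track=rewrite | github.com/marchelxyz/MugleHRbotTopManagment | backend/bot.py | classify_telegram_error
-- ===== SOURCE A (Python) =====
-- _TG_TOPIC_ERROR_PATTERNS = (
--     "message thread not found",
--     "topic_closed",
--     "topic_deleted",
-- )
--
-- def classify_telegram_error(description: str) -> str:
--     """Возвращает короткий код ошибки Telegram: blocked / not_found / topic / parse / other."""
--     if not description:
--         return "other"
--     desc = description.lower()
--     if "blocked by the user" in desc:
--         return "blocked"
--     if "user is deactivated" in desc:
--         return "deactivated"
--     if "chat not found" in desc or "peer_id_invalid" in desc: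
--         return "not_found"
--     if "bot can't initiate conversation" in desc:
--         return "no_dialog"
--     if any(p in desc for p in _TG_TOPIC_ERROR_PATTERNS):
--         return "topic"
--     if "can't parse entities" in desc or "bad request: can't parse" in desc:
--         return "parse"
--     if "too many requests" in desc:
--         return "rate_limit"
--     if "timed out" in desc or "timeout" in desc:
--         return "timeout"
--     if "network" in desc or "name or service not known" in desc or "connection" in desc:
--         return "network"
--     return "other"
-- ===== SOURCE B (Python) =====
-- # B: test every pattern, collect all matching category codes, then pick the
-- # highest-priority (minimum-rank) one -- no first-match if-cascade.
-- _PATTERN_CODE = {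
--     "blocked by the user": "blocked",
--     "user is deactivated": "deactivated",
--     "chat not found": "not_found",
--     "peer_id_invalid": "not_found",
--     "bot can't initiate conversation": "no_dialog",
--     "message thread not found": "topic",
--     "topic_closed": "topic",
--     "topic_deleted": "topic",
--     "can't parse entities": "parse",
--     "bad request: can't parse": "parse",
--     "too many requests": "rate_limit",
--     "timed out": "timeout",
--     "timeout": "timeout",
--     "network": "network",
--     "name or service not known": "network",
--     "connection": "network",
-- }
--
-- _PRIORITY = {
--     "blocked": 0, "deactivated": 1, "not_found": 2, "no_dialog": 3,
--     "topic": 4, "parse": 5, "rate_limit": 6, "timeout": 7, "network": 8,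
-- }
--
--
-- def classify_telegram_error(description: str) -> str:
--     if not description:
--         return "other"
--     desc = description.lower()
--     matched = [code for pat, code in _PATTERN_CODE.items() if pat in desc]
--     if not matched:
--         return "other"
--     return min(matched, key=_PRIORITY.__getitem__)
-- ===== Notes on version B (the rewrite author's own statement) =====
-- stated objective: alternative
-- what changed: Instead of A's first-match if-cascade that stops at the first hit, B always evaluates all 16 patterns, collects every matching category code into a list, and returns the minimum element under an explicit priority ranking (or 'other' when nothing matched).
import Mathlib
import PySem

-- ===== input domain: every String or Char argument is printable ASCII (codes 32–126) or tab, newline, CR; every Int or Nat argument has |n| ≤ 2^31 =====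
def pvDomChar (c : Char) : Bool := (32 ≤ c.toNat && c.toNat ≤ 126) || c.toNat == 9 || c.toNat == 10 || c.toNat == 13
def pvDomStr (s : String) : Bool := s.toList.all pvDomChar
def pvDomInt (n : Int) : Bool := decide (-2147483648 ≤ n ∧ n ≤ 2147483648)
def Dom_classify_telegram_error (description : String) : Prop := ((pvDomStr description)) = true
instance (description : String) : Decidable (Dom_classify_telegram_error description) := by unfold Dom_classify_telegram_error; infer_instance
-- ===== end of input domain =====

-- Header: B tests all patterns and returns the minimum-priority matched code, instead of A's
-- short-circuiting if-cascade (objective: alternative, same cost).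

-- ===== PORT A =====
def classify_telegram_error (description : String) : String :=
  if description == "" then "other"
  else
    let desc := PySem.Str.lower description
    if PySem.Str.isIn "blocked by the user" desc then "blocked"
    else if PySem.Str.isIn "user is deactivated" desc then "deactivated"
    else if PySem.Str.isIn "chat not found" desc || PySem.Str.isIn "peer_id_invalid" desc then "not_found"
    else if PySem.Str.isIn "bot can't initiate conversation" desc then "no_dialog"
    else if ["message thread not found", "topic_closed", "topic_deleted"].any (fun p => PySem.Str.isIn p desc) then "topic"
    else if PySem.Str.isIn "can't parse entities" desc || PySem.Str.isIn "bad request: can't parse" desc then "parse"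
    else if PySem.Str.isIn "too many requests" desc then "rate_limit"
    else if PySem.Str.isIn "timed out" desc || PySem.Str.isIn "timeout" desc then "timeout"
    else if PySem.Str.isIn "network" desc || PySem.Str.isIn "name or service not known" desc || PySem.Str.isIn "connection" desc then "network"
    else "other"

-- ===== PORT B =====
-- B: every pattern mapped to its code; collect all matching codes, pick the minimum-priority one.
def pvPatternCode : List (String × String) :=
  [ ("blocked by the user", "blocked"),
    ("user is deactivated", "deactivated"),
    ("chat not found", "not_found"),
    ("peer_id_invalid", "not_found"),
    ("bot can't initiate conversation", "no_dialog"),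
    ("message thread not found", "topic"),
    ("topic_closed", "topic"),
    ("topic_deleted", "topic"),
    ("can't parse entities", "parse"),
    ("bad request: can't parse", "parse"),
    ("too many requests", "rate_limit"),
    ("timed out", "timeout"),
    ("timeout", "timeout"),
    ("network", "network"),
    ("name or service not known", "network"),
    ("connection", "network") ]

def pvPriority : PySem.Dict String Int :=
  PySem.Dict.ofList
    [ ("blocked", (0 : Int)), ("deactivated", 1), ("not_found", 2), ("no_dialog", 3),
      ("topic", 4), ("parse", 5), ("rate_limit", 6), ("timeout", 7), ("network", 8) ]

def classify_telegram_error_alt (description : String) : String :=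
  if description == "" then "other"
  else
    let desc := PySem.Str.lower description
    let matched := (pvPatternCode.filter (fun pc => PySem.Str.isIn pc.1 desc)).map Prod.snd
    if matched.isEmpty then "other"
    else
      -- min(matched, key=_PRIORITY.__getitem__); matched is nonempty here, so min? is some
      match PySem.List.min? matched (fun c => PySem.Dict.getD pvPriority c 9) with
      | some c => c
      | none => "other"

-- ===== PRECONDITION & SPEC =====
def Spec_classify_telegram_error (description : String) (out : String) : Prop := out = classify_telegram_error_alt description
instance (description : String) (out : String) : Decidable (Spec_classify_telegram_error description out) := by unfold Spec_classify_telegram_error; infer_instance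

-- ===== CLAIM (what is proved, stated in full; the proofs are below) =====
def Claim_equal_classify_telegram_error : Prop := ∀ (description : String), Dom_classify_telegram_error description → Spec_classify_telegram_error description (classify_telegram_error description)

-- ===== LEMMAS AND PROOFS =====

-- min?'s foldl keeps an accumulator that is already minimal
lemma pv_foldl_min_keep {α : Type} (key : α → Int) (m : α) (t : List α)
    (h : ∀ y ∈ t, key m ≤ key y) :
    t.foldl (fun acc x => match acc with
      | none => some x
      | some m' => if key x < key m' then some x else some m') (some m) = some m := by
  induction t with
  | nil => rfl
  | cons a t ih =>
    have ha : ¬ key a < key m := not_lt.2 (h a (by simp))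
    simp only [List.foldl_cons, ha, if_false]
    exact ih (fun y hy => h y (by simp [hy]))

-- min? of a cons whose head is minimal is the head
lemma pv_min?_cons {α : Type} (key : α → Int) (m : α) (t : List α)
    (h : ∀ y ∈ t, key m ≤ key y) :
    PySem.List.min? (m :: t) key = some m := by
  simp only [PySem.List.min?, List.foldl_cons]
  exact pv_foldl_min_keep key m t h

lemma pv_mem_map_snd_filter {p : String × String → Bool} {l : List (String × String)} {y : String}
    (h : y ∈ (l.filter p).map Prod.snd) : y ∈ l.map Prod.snd := by
  rcases List.mem_map.1 h with ⟨x, hx, rfl⟩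
  exact List.mem_map_of_mem (List.mem_of_mem_filter hx)

-- ===== VERDICT (by name: the statement is the Claim_ definition above) =====
theorem classify_telegram_error_spec : Claim_equal_classify_telegram_error := by
  intro d _
  unfold Spec_classify_telegram_error classify_telegram_error classify_telegram_error_alt
  by_cases h0 : d == ""
  · simp [h0]
  · simp only [h0, Bool.false_eq_true, if_false]
    generalize PySem.Str.lower d = desc
    simp only [pvPatternCode]
    by_cases h1 : PySem.Str.isIn "blocked by the user" desc = true
    · rw [List.filter_cons_of_pos (by simpa using h1), List.map_cons, pv_min?_cons]
      · simp_all
      · intro y hy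
        have hm := pv_mem_map_snd_filter hy
        simp only [List.map_cons, List.map_nil] at hm
        fin_cases hm <;> decide
    · rw [List.filter_cons_of_neg (by simpa using h1)]
      by_cases h2 : PySem.Str.isIn "user is deactivated" desc = true
      · rw [List.filter_cons_of_pos (by simpa using h2), List.map_cons, pv_min?_cons]
        · simp_all
        · intro y hy
          have hm := pv_mem_map_snd_filter hy
          simp only [List.map_cons, List.map_nil] at hm
          fin_cases hm <;> decide
      · rw [List.filter_cons_of_neg (by simpa using h2)]
        by_cases h3 : PySem.Str.isIn "chat not found" desc = true
        · rw [List.filter_cons_of_pos (by simpa using h3), List.map_cons, pv_min?_cons]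
          · simp_all
          · intro y hy
            have hm := pv_mem_map_snd_filter hy
            simp only [List.map_cons, List.map_nil] at hm
            fin_cases hm <;> decide
        · rw [List.filter_cons_of_neg (by simpa using h3)]
          by_cases h4 : PySem.Str.isIn "peer_id_invalid" desc = true
          · rw [List.filter_cons_of_pos (by simpa using h4), List.map_cons, pv_min?_cons]
            · simp_all
            · intro y hy
              have hm := pv_mem_map_snd_filter hy
              simp only [List.map_cons, List.map_nil] at hm
              fin_cases hm <;> decide
          · rw [List.filter_cons_of_neg (by simpa using h4)]
            by_cases h5 : PySem.Str.isIn "bot can't initiate conversation" desc = true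
            · rw [List.filter_cons_of_pos (by simpa using h5), List.map_cons, pv_min?_cons]
              · simp_all
              · intro y hy
                have hm := pv_mem_map_snd_filter hy
                simp only [List.map_cons, List.map_nil] at hm
                fin_cases hm <;> decide
            · rw [List.filter_cons_of_neg (by simpa using h5)]
              by_cases h6 : PySem.Str.isIn "message thread not found" desc = true
              · rw [List.filter_cons_of_pos (by simpa using h6), List.map_cons, pv_min?_cons]
                · simp_all
                · intro y hy
                  have hm := pv_mem_map_snd_filter hy
                  simp only [List.map_cons, List.map_nil] at hm
                  fin_cases hm <;> decide
              · rw [List.filter_cons_of_neg (by simpa using h6)]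
                by_cases h7 : PySem.Str.isIn "topic_closed" desc = true
                · rw [List.filter_cons_of_pos (by simpa using h7), List.map_cons, pv_min?_cons]
                  · simp_all
                  · intro y hy
                    have hm := pv_mem_map_snd_filter hy
                    simp only [List.map_cons, List.map_nil] at hm
                    fin_cases hm <;> decide
                · rw [List.filter_cons_of_neg (by simpa using h7)]
                  by_cases h8 : PySem.Str.isIn "topic_deleted" desc = true
                  · rw [List.filter_cons_of_pos (by simpa using h8), List.map_cons, pv_min?_cons]
                    · simp_all
                    · intro y hy
                      have hm := pv_mem_map_snd_filter hy
                      simp only [List.map_cons, List.map_nil] at hm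
                      fin_cases hm <;> decide
                  · rw [List.filter_cons_of_neg (by simpa using h8)]
                    by_cases h9 : PySem.Str.isIn "can't parse entities" desc = true
                    · rw [List.filter_cons_of_pos (by simpa using h9), List.map_cons, pv_min?_cons]
                      · simp_all
                      · intro y hy
                        have hm := pv_mem_map_snd_filter hy
                        simp only [List.map_cons, List.map_nil] at hm
                        fin_cases hm <;> decide
                    · rw [List.filter_cons_of_neg (by simpa using h9)]
                      by_cases h10 : PySem.Str.isIn "bad request: can't parse" desc = true
                      · rw [List.filter_cons_of_pos (by simpa using h10), List.map_cons, pv_min?_cons]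
                        · simp_all
                        · intro y hy
                          have hm := pv_mem_map_snd_filter hy
                          simp only [List.map_cons, List.map_nil] at hm
                          fin_cases hm <;> decide
                      · rw [List.filter_cons_of_neg (by simpa using h10)]
                        by_cases h11 : PySem.Str.isIn "too many requests" desc = true
                        · rw [List.filter_cons_of_pos (by simpa using h11), List.map_cons, pv_min?_cons]
                          · simp_all
                          · intro y hy
                            have hm := pv_mem_map_snd_filter hy
                            simp only [List.map_cons, List.map_nil] at hm
                            fin_cases hm <;> decide
                        · rw [List.filter_cons_of_neg (by simpa using h11)]
                          by_cases h12 : PySem.Str.isIn "timed out" desc = true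
                          · rw [List.filter_cons_of_pos (by simpa using h12), List.map_cons, pv_min?_cons]
                            · simp_all
                            · intro y hy
                              have hm := pv_mem_map_snd_filter hy
                              simp only [List.map_cons, List.map_nil] at hm
                              fin_cases hm <;> decide
                          · rw [List.filter_cons_of_neg (by simpa using h12)]
                            by_cases h13 : PySem.Str.isIn "timeout" desc = true
                            · rw [List.filter_cons_of_pos (by simpa using h13), List.map_cons, pv_min?_cons]
                              · simp_all
                              · intro y hy
                                have hm := pv_mem_map_snd_filter hy
                                simp only [List.map_cons, List.map_nil] at hm
                                fin_cases hm <;> decide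
                            · rw [List.filter_cons_of_neg (by simpa using h13)]
                              by_cases h14 : PySem.Str.isIn "network" desc = true
                              · rw [List.filter_cons_of_pos (by simpa using h14), List.map_cons, pv_min?_cons]
                                · simp_all
                                · intro y hy
                                  have hm := pv_mem_map_snd_filter hy
                                  simp only [List.map_cons, List.map_nil] at hm
                                  fin_cases hm <;> decide
                              · rw [List.filter_cons_of_neg (by simpa using h14)]
                                by_cases h15 : PySem.Str.isIn "name or service not known" desc = true
                                · rw [List.filter_cons_of_pos (by simpa using h15), List.map_cons, pv_min?_cons]
                                  · simp_all
                                  · intro y hy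
                                    have hm := pv_mem_map_snd_filter hy
                                    simp only [List.map_cons, List.map_nil] at hm
                                    fin_cases hm; decide
                                · rw [List.filter_cons_of_neg (by simpa using h15)]
                                  by_cases h16 : PySem.Str.isIn "connection" desc = true
                                  · rw [List.filter_cons_of_pos (by simpa using h16), List.map_cons, pv_min?_cons]
                                    · simp_all
                                    · intro y hy
                                      have hm := pv_mem_map_snd_filter hy
                                      simp at hm
                                  · rw [List.filter_cons_of_neg (by simpa using h16)]
                                    simp_all
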